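-- pv_equiv track=rewrite | github.com/williamtrang/DSC20 | homeworks/hw02/hw02.py | channel_stats
-- ===== SOURCE A (Python) =====
-- def channel_stats(videos_stats):
--     """
--     # Takes in a list of lists with 4 elements each. Adds up
--     # the values with the same index and returns all the
--     # summed values.
--
--     >>> channel_stats ([[123, 231, 82, 430], [340, 158, 225, 647]])
--     [('likes', 463), ('dislikes', 389), ('comments', 307), ('views', 1077)]
--     >>> channel_stats([[865, 342, 205, 230]])
--     [('likes', 865), ('dislikes', 342), ('comments', 205), ('views', 230)]
--     >>> channel_stats([[954, 234, 235, 2035], [1040, 350, 394, 2500], \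
-- [70, 43, 23, 230]])
--     [('likes', 2064), ('dislikes', 627), ('comments', 652), ('views', 4765)]
--
--     # Add at least 3 doctests below here #
--     >>> channel_stats([[0, 0, 0, 0], [0, 0, 0, 0]])
--     [('likes', 0), ('dislikes', 0), ('comments', 0), ('views', 0)]
--     >>> channel_stats([[12, 24, 36, 48], [2, 3, 4, 5], [11, 22, 33, 44]])
--     [('likes', 25), ('dislikes', 49), ('comments', 73), ('views', 97)]
--     >>> channel_stats([[1, 2, 3, 4], [4, 5, 6, 7]])
--     [('likes', 5), ('dislikes', 7), ('comments', 9), ('views', 11)]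
--     """
--     total_likes = 0
--     total_dislikes = 0
--     total_comments = 0
--     total_views = 0
--
--     likes_index = 0
--     dislikes_index = 1
--     comments_index = 2
--     views_index = 3
--
--     for i in range(0, len(videos_stats)):
--         total_likes += videos_stats[i][likes_index]
--         total_dislikes += videos_stats[i][dislikes_index]
--         total_comments += videos_stats[i][comments_index]
--         total_views += videos_stats[i][views_index]
--     return [('likes', total_likes), ('dislikes', total_dislikes),
--             ('comments', total_comments), ('views', total_views)]
-- ===== SOURCE B (Python) =====
-- def channel_stats(videos_stats):
--     columns = [('likes', 0), ('dislikes', 1), ('comments', 2), ('views', 3)]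
--     return [(label, sum(row[idx] for row in videos_stats))
--             for label, idx in columns]
-- ===== Notes on version B (the rewrite author's own statement) =====
-- stated objective: alternative
-- what changed: Column-major computation: a list of (label, index) pairs drives four separate per-column sums over the rows, replacing A's single row-major loop with four simultaneous accumulators.
import Mathlib
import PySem

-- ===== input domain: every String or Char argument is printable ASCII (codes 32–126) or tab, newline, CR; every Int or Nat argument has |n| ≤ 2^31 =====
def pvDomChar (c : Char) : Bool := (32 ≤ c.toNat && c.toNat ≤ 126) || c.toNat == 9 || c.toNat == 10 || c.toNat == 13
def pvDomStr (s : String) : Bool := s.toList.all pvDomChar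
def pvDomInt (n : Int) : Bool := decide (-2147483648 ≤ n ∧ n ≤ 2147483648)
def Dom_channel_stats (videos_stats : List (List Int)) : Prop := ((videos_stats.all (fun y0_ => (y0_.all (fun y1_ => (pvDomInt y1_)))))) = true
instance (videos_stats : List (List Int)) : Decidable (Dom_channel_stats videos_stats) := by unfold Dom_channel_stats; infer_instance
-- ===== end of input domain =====

-- B computes the same table column-major (one per-column sum per label) instead of A's
-- row-major loop with four accumulators; alternative decomposition, same cost.

-- ===== PORT A =====
-- A: loop over i in range(len(videos_stats)), four running totals.
def channel_stats (videos_stats : List (List Int)) : List (String × Int) :=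
  let st : Int × Int × Int × Int :=
    (PySem.List.pyRange 0 (videos_stats.length : Int) 1).foldl
      (fun (t : Int × Int × Int × Int) i =>
        let row := PySem.List.pyGetD videos_stats i []
        (t.1 + PySem.List.pyGetD row 0 0,
         t.2.1 + PySem.List.pyGetD row 1 0,
         t.2.2.1 + PySem.List.pyGetD row 2 0,
         t.2.2.2 + PySem.List.pyGetD row 3 0))
      (0, 0, 0, 0)
  [("likes", st.1), ("dislikes", st.2.1), ("comments", st.2.2.1), ("views", st.2.2.2)]

-- ===== PORT B =====
-- B helper: sum(row[idx] for row in videos_stats)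
def colSum (videos_stats : List (List Int)) (idx : Int) : Int :=
  videos_stats.foldl (fun acc row => acc + PySem.List.pyGetD row idx 0) 0

def channel_stats_alt (videos_stats : List (List Int)) : List (String × Int) :=
  [("likes", (0 : Int)), ("dislikes", 1), ("comments", 2), ("views", 3)].map
    (fun p => (p.1, colSum videos_stats p.2))

-- ===== PRECONDITION & SPEC =====
-- Pre_ excludes exactly the inputs on which Python A raises IndexError: a row shorter than 4.
def Pre_channel_stats (videos_stats : List (List Int)) : Prop :=
  ∀ row ∈ videos_stats, 4 ≤ row.length

instance (videos_stats : List (List Int)) : Decidable (Pre_channel_stats videos_stats) := by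
  unfold Pre_channel_stats; infer_instance

def pvWitness_channel_stats : List (List Int) := [[1, 2, 3, 4], [5, 6, 7, 8]]

def Spec_channel_stats (videos_stats : List (List Int)) (out : List (String × Int)) : Prop := out = channel_stats_alt videos_stats
instance (videos_stats : List (List Int)) (out : List (String × Int)) : Decidable (Spec_channel_stats videos_stats out) := by unfold Spec_channel_stats; infer_instance

-- ===== CLAIM (what is proved, stated in full; the proofs are below) =====
def Claim_equal_channel_stats : Prop := ∀ (videos_stats : List (List Int)), Dom_channel_stats videos_stats → Pre_channel_stats videos_stats → Spec_channel_stats videos_stats (channel_stats videos_stats)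

-- ===== LEMMAS AND PROOFS =====

-- shifting the initial accumulator out of an additive fold
theorem foldl_add_shift (g : List Int → Int) :
    ∀ (vs : List (List Int)) (a : Int),
      vs.foldl (fun acc r => acc + g r) a = a + vs.foldl (fun acc r => acc + g r) 0 := by
  intro vs
  induction vs with
  | nil => intro a; simp
  | cons r vs ih =>
      intro a
      simp only [List.foldl_cons]
      rw [ih (a + g r), ih (0 + g r)]
      ring

-- A's quadruple fold computed column by column
theorem quad_fold (vs : List (List Int)) :
    ∀ (a b c d : Int),
      vs.foldl
        (fun (t : Int × Int × Int × Int) row =>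
          (t.1 + PySem.List.pyGetD row 0 0,
           t.2.1 + PySem.List.pyGetD row 1 0,
           t.2.2.1 + PySem.List.pyGetD row 2 0,
           t.2.2.2 + PySem.List.pyGetD row 3 0))
        (a, b, c, d)
      = (a + colSum vs 0, b + colSum vs 1, c + colSum vs 2, d + colSum vs 3) := by
  induction vs with
  | nil => intro a b c d; simp [colSum]
  | cons r vs ih =>
      intro a b c d
      simp only [List.foldl_cons]
      rw [ih]
      simp only [colSum, List.foldl_cons]
      rw [foldl_add_shift (fun row => PySem.List.pyGetD row 0 0) vs (0 + PySem.List.pyGetD r 0 0),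
          foldl_add_shift (fun row => PySem.List.pyGetD row 1 0) vs (0 + PySem.List.pyGetD r 1 0),
          foldl_add_shift (fun row => PySem.List.pyGetD row 2 0) vs (0 + PySem.List.pyGetD r 2 0),
          foldl_add_shift (fun row => PySem.List.pyGetD row 3 0) vs (0 + PySem.List.pyGetD r 3 0)]
      simp only [Prod.mk.injEq]
      refine ⟨by ring, by ring, by ring, by ring⟩

-- ===== VERDICT (by name: the statement is the Claim_ definition above) =====
theorem channel_stats_spec : Claim_equal_channel_stats := by
  intro vs _ _
  unfold Spec_channel_stats channel_stats channel_stats_alt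
  rw [PySem.List.foldl_pyRange_zero_pyGetD' vs ([] : List Int)
        (fun (t : Int × Int × Int × Int) row =>
          (t.1 + PySem.List.pyGetD row 0 0,
           t.2.1 + PySem.List.pyGetD row 1 0,
           t.2.2.1 + PySem.List.pyGetD row 2 0,
           t.2.2.2 + PySem.List.pyGetD row 3 0)) (0, 0, 0, 0)]
  rw [quad_fold]
  simp
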